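-- pv_equiv track=rewrite | github.com/shabnomm/predictive-dispatcher | backend/app/services/scoring.py | _required_skills_from_flags
-- ===== SOURCE A (Python) =====
-- from typing import List
--
-- def _required_skills_from_flags(flags: List[str]) -> List[str]:
--     """
--     Map alert flags to technician skills.
--     Make sure these skills align with what technicians actually have.
--     """
--     skills = set()
--     for f in flags:
--         if "ENGINE" in f or "TEMP" in f:
--             skills.add("engine")
--         if "FUEL" in f:
--             skills.add("fuel")
--         if "VIBRATION" in f:
--             skills.add("engine")  # vibration often mechanical/engine in PoC
--         if "BATTERY" in f or "ELECT" in f: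
--             skills.add("electrical")
--
--     # IMPORTANT: don't return a skill that no technician has.
--     # Use "general" as default skill for basic inspections.
--     if not skills:
--         skills.add("general")
--
--     return sorted(skills)
-- ===== SOURCE B (Python) =====
-- _KEYWORD_BITS = (
--     ("ENGINE", 1), ("TEMP", 1), ("VIBRATION", 1),   # engine
--     ("FUEL", 2),                                    # fuel
--     ("BATTERY", 4), ("ELECT", 4),                   # electrical
-- )
--
-- # mask -> already-sorted skill list (0 = no keyword hit -> "general" fallback)
-- _SKILLS_BY_MASK = {
--     0: ["general"],
--     1: ["engine"],
--     2: ["fuel"],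
--     3: ["engine", "fuel"],
--     4: ["electrical"],
--     5: ["electrical", "engine"],
--     6: ["electrical", "fuel"],
--     7: ["electrical", "engine", "fuel"],
-- }
--
-- def _required_skills_from_flags(flags):
--     """Map alert flags to technician skills via a keyword bitmask and a dispatch table."""
--     mask = 0
--     for f in flags:
--         for kw, bit in _KEYWORD_BITS:
--             if kw in f:
--                 mask |= bit
--     return _SKILLS_BY_MASK[mask]
-- ===== Notes on version B (the rewrite author's own statement) =====
-- stated objective: alternative
-- what changed: Replaces the per-flag set accumulation and final sort with a keyword-to-bit table OR-ed into a single integer bitmask and a precomputed mask-to-sorted-skill-list dispatch table; no set, no conditionals per skill, no sort.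
import Mathlib
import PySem

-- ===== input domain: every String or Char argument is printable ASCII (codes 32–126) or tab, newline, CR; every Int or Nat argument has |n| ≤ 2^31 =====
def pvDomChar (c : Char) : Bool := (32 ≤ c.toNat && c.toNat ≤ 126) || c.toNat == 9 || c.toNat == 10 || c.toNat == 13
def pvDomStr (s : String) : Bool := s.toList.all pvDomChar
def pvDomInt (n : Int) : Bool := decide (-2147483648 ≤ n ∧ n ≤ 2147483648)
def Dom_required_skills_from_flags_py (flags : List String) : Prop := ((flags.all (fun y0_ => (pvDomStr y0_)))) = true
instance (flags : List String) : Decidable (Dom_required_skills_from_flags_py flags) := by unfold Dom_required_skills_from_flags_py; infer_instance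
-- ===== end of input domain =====

-- B replaces A's per-flag set accumulation + final sort by a keyword→bit table OR-ed
-- into one bitmask and a precomputed mask→skill-list dispatch table (objective: alternative).

-- ===== PORT A =====
-- loop body of A's 'for f in flags', accumulating the set of skills
def pvStepA (s : PySem.Set String) (f : String) : PySem.Set String :=
  let s := if PySem.Str.isIn "ENGINE" f || PySem.Str.isIn "TEMP" f then PySem.Set.add s "engine" else s
  let s := if PySem.Str.isIn "FUEL" f then PySem.Set.add s "fuel" else s
  let s := if PySem.Str.isIn "VIBRATION" f then PySem.Set.add s "engine" else s
  let s := if PySem.Str.isIn "BATTERY" f || PySem.Str.isIn "ELECT" f then PySem.Set.add s "electrical" else s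
  s

def required_skills_from_flags_py (flags : List String) : List String :=
  let skills := flags.foldl pvStepA PySem.Set.empty
  let skills := if skills.isEmpty then PySem.Set.add skills "general" else skills
  PySem.List.sorted skills (fun x => x) false

-- ===== PORT B =====
def pvKeywordBits : List (String × Nat) :=
  [("ENGINE", 1), ("TEMP", 1), ("VIBRATION", 1), ("FUEL", 2), ("BATTERY", 4), ("ELECT", 4)]

def pvSkillsByMask : PySem.Dict Nat (List String) :=
  PySem.Dict.ofList
    [(0, ["general"]), (1, ["engine"]), (2, ["fuel"]), (3, ["engine", "fuel"]),
     (4, ["electrical"]), (5, ["electrical", "engine"]), (6, ["electrical", "fuel"]),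
     (7, ["electrical", "engine", "fuel"])]

def required_skills_from_flags_py_alt (flags : List String) : List String :=
  let mask := flags.foldl
    (fun m f => pvKeywordBits.foldl (fun m p => if PySem.Str.isIn p.1 f then m ||| p.2 else m) m) 0
  -- _SKILLS_BY_MASK[mask]; the key is always present (mask < 8), so the .getD [] default is dead
  (PySem.Dict.get? pvSkillsByMask mask).getD []

-- ===== PRECONDITION & SPEC =====
def Spec_required_skills_from_flags_py (flags : List String) (out : List String) : Prop := out = required_skills_from_flags_py_alt flags
instance (flags : List String) (out : List String) : Decidable (Spec_required_skills_from_flags_py flags out) := by unfold Spec_required_skills_from_flags_py; infer_instance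

-- ===== CLAIM (what is proved, stated in full; the proofs are below) =====
def Claim_equal_required_skills_from_flags_py : Prop := ∀ (flags : List String), Dom_required_skills_from_flags_py flags → Spec_required_skills_from_flags_py flags (required_skills_from_flags_py flags)

-- ===== LEMMAS AND PROOFS =====

-- per-flag predicates, one per skill
def pvE (f : String) : Bool := PySem.Str.isIn "ENGINE" f || PySem.Str.isIn "TEMP" f || PySem.Str.isIn "VIBRATION" f
def pvF (f : String) : Bool := PySem.Str.isIn "FUEL" f
def pvL (f : String) : Bool := PySem.Str.isIn "BATTERY" f || PySem.Str.isIn "ELECT" f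

-- ---- A-side characterisation ----
theorem mem_pvStepA (s : PySem.Set String) (f : String) (x : String) :
    x ∈ pvStepA s f ↔ x ∈ s ∨ (x = "engine" ∧ pvE f) ∨ (x = "fuel" ∧ pvF f) ∨ (x = "electrical" ∧ pvL f) := by
  unfold pvStepA pvE pvF pvL
  split_ifs <;> simp_all [PySem.Set.mem_add] <;> tauto

theorem nodup_pvStepA (s : PySem.Set String) (f : String) (h : s.Nodup) : (pvStepA s f).Nodup := by
  unfold pvStepA
  split_ifs <;> repeat first | exact PySem.Set.nodup_add _ _ ‹_› | apply PySem.Set.nodup_add | assumption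

theorem nodup_foldA (flags : List String) (s : PySem.Set String) (h : s.Nodup) :
    (flags.foldl pvStepA s).Nodup := by
  induction flags generalizing s with
  | nil => exact h
  | cons f t ih => exact ih _ (nodup_pvStepA s f h)

theorem mem_foldA (flags : List String) (s : PySem.Set String) (x : String) :
    x ∈ flags.foldl pvStepA s ↔
      x ∈ s ∨ (x = "engine" ∧ flags.any pvE) ∨ (x = "fuel" ∧ flags.any pvF) ∨ (x = "electrical" ∧ flags.any pvL) := by
  induction flags generalizing s with
  | nil => simp
  | cons f t ih =>
    simp only [List.foldl_cons, ih, mem_pvStepA, List.any_cons, Bool.or_eq_true]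
    tauto

theorem pv_sorted_eq (S ys : List String) (hnd : S.Nodup) (hys : ys.Nodup)
    (hp : ys.Pairwise (fun a b => a < b)) (hm : ∀ x, x ∈ S ↔ x ∈ ys) :
    PySem.List.sorted S (fun x => x) false = ys :=
  PySem.List.sorted_eq_of_perm_of_pairwise_lt S ys (fun x => x)
    ((List.perm_ext_iff_of_nodup hys hnd).mpr (fun a => (hm a).symm)) hp

-- ---- B-side characterisation of the bitmask ----


def pvMaskOf (f : String) : Nat :=
  pvKeywordBits.foldl (fun m p => if PySem.Str.isIn p.1 f then m ||| p.2 else m) 0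

theorem pvInner_lor (f : String) (m : Nat) :
    pvKeywordBits.foldl (fun m p => if PySem.Str.isIn p.1 f then m ||| p.2 else m) m
      = m ||| pvMaskOf f := by
  unfold pvMaskOf pvKeywordBits
  simp only [List.foldl_cons, List.foldl_nil]
  split_ifs <;> simp [Nat.lor_assoc]

theorem pvMaskOf_eq (f : String) :
    pvMaskOf f = (if pvE f then 1 else 0) ||| (if pvF f then 2 else 0) ||| (if pvL f then 4 else 0) := by
  unfold pvMaskOf pvKeywordBits pvE pvF pvL
  simp only [List.foldl_cons, List.foldl_nil]
  cases h1 : PySem.Str.isIn "ENGINE" f <;> cases h2 : PySem.Str.isIn "TEMP" f <;>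
    cases h3 : PySem.Str.isIn "VIBRATION" f <;> cases h4 : PySem.Str.isIn "FUEL" f <;>
    cases h5 : PySem.Str.isIn "BATTERY" f <;> cases h6 : PySem.Str.isIn "ELECT" f <;>
    simp

theorem pv_maskFold_aux (flags : List String) (m : Nat) :
    flags.foldl (fun m f => m ||| pvMaskOf f) m
      = m ||| ((if flags.any pvE then 1 else 0) ||| (if flags.any pvF then 2 else 0) ||| (if flags.any pvL then 4 else 0)) := by
  induction flags generalizing m with
  | nil => simp
  | cons f t ih =>
    rw [List.foldl_cons, ih, pvMaskOf_eq]
    simp only [List.any_cons]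
    rcases Bool.eq_false_or_eq_true (pvE f) with hE | hE <;>
      rcases Bool.eq_false_or_eq_true (pvF f) with hF | hF <;>
      rcases Bool.eq_false_or_eq_true (pvL f) with hL | hL <;>
      rcases Bool.eq_false_or_eq_true (t.any pvE) with htE | htE <;>
      rcases Bool.eq_false_or_eq_true (t.any pvF) with htF | htF <;>
      rcases Bool.eq_false_or_eq_true (t.any pvL) with htL | htL <;>
      simp [hE, hF, hL, htE, htF, htL, Nat.lor_assoc]

theorem pvMaskFold_eq (flags : List String) (m : Nat) :
    flags.foldl
      (fun m f => pvKeywordBits.foldl (fun m p => if PySem.Str.isIn p.1 f then m ||| p.2 else m) m) m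
      = m ||| ((if flags.any pvE then 1 else 0) ||| (if flags.any pvF then 2 else 0) ||| (if flags.any pvL then 4 else 0)) := by
  simp only [pvInner_lor]
  exact pv_maskFold_aux flags m

-- ===== VERDICT (by name: the statement is the Claim_ definition above) =====
theorem required_skills_from_flags_py_spec : Claim_equal_required_skills_from_flags_py := by
  intro flags _
  show required_skills_from_flags_py flags = required_skills_from_flags_py_alt flags
  have hmem := mem_foldA flags PySem.Set.empty
  have hnd := nodup_foldA flags PySem.Set.empty (by simp [PySem.Set.empty])
  unfold required_skills_from_flags_py required_skills_from_flags_py_alt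
  rw [pvMaskFold_eq]
  set S := flags.foldl pvStepA PySem.Set.empty with hS
  clear_value S
  cases hE : flags.any pvE <;> cases hF : flags.any pvF <;> cases hL : flags.any pvL <;>
    simp only [hE, hF, hL, Bool.false_eq_true, and_false, and_true, or_false, false_or,
      PySem.Set.empty, List.not_mem_nil] at hmem ⊢
  case false.false.false =>
    have h0 : S = [] := by
      cases S with
      | nil => rfl
      | cons a t => exact absurd ((hmem a).mp (by simp)) (by simp)
    subst h0
    decide
  all_goals {
    have hSne : S.isEmpty = false := by
      rw [List.isEmpty_eq_false_iff]
      intro h0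
      subst h0
      first
        | exact (by simpa using (hmem "engine").mpr (by tauto))
        | exact (by simpa using (hmem "fuel").mpr (by tauto))
        | exact (by simpa using (hmem "electrical").mpr (by tauto))
    rw [hSne]
    simp only [Bool.false_eq_true, reduceIte]
    refine pv_sorted_eq S _ hnd (by decide) (by simp [String.lt_iff_toList_lt]; try decide) ?_
    intro x
    rw [hmem x]
    first
      | rw [show (pvSkillsByMask.get? (0 ||| (1 ||| 0 ||| 0))).getD [] = ["engine"] from by decide]
      | rw [show (pvSkillsByMask.get? (0 ||| (0 ||| 2 ||| 0))).getD [] = ["fuel"] from by decide]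
      | rw [show (pvSkillsByMask.get? (0 ||| (1 ||| 2 ||| 0))).getD [] = ["engine", "fuel"] from by decide]
      | rw [show (pvSkillsByMask.get? (0 ||| (0 ||| 0 ||| 4))).getD [] = ["electrical"] from by decide]
      | rw [show (pvSkillsByMask.get? (0 ||| (1 ||| 0 ||| 4))).getD [] = ["electrical", "engine"] from by decide]
      | rw [show (pvSkillsByMask.get? (0 ||| (0 ||| 2 ||| 4))).getD [] = ["electrical", "fuel"] from by decide]
      | rw [show (pvSkillsByMask.get? (0 ||| (1 ||| 2 ||| 4))).getD [] = ["electrical", "engine", "fuel"] from by decide]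
    simp
    try tauto }
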